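-- pv_equiv track=rewrite | github.com/guvenacar/Radix-Hash | debug_hash.py | xor_not_reverse_dynamic_count
-- ===== SOURCE A (Python) =====
-- def xor_not_reverse_dynamic_count(bits):
--     N = len(bits)
--     mid = N // 2
--     A = bits[:mid]
--     B = bits[mid:]
--
--     xor_len = min(len(A), len(B))
--     X = [str(int(A[i]) ^ int(B[i])) for i in range(xor_len)]
--     X_not_rev = ['1' if ch == '0' else '0' for ch in X][::-1]
--
--     counts = []
--     if X:
--         prev = X[0]
--         cnt = 1
--         for ch in X[1:]:
--             if ch == prev:
--                 cnt += 1
--             else: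
--                 counts.append(cnt)
--                 cnt = 1
--                 prev = ch
--         counts.append(cnt)
--
--     out = []
--     pos_X = 0
--     pos_rev = 0
--     for c in counts:
--         out.extend(X[pos_X:pos_X+c])
--         pos_X += c
--         out.extend(X_not_rev[pos_rev:pos_rev+c])
--         pos_rev += c
--
--     return "".join(out)
-- ===== SOURCE B (Python) =====
-- def xor_not_reverse_dynamic_count(bits):
--     N = len(bits)
--     mid = N // 2
--     A = bits[:mid]
--     B = bits[mid:]
--
--     xor_len = min(len(A), len(B))
--     X = [str(int(A[i]) ^ int(B[i])) for i in range(xor_len)]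
--     X_not_rev = ['1' if ch == '0' else '0' for ch in X][::-1]
--
--     # Fused single pass: no counts list, no second loop with two position
--     # counters -- scan each run in place and emit both halves immediately.
--     parts = []
--     i = 0
--     n = len(X)
--     while i < n:
--         j = i + 1
--         while j < n and X[j] == X[i]:
--             j += 1
--         parts.append(X[i] * (j - i))
--         parts.append("".join(X_not_rev[i:j]))
--         i = j
--     return "".join(parts)
-- ===== Notes on version B (the rewrite author's own statement) =====
-- stated objective: alternative
-- what changed: The intermediate run-length counts list and the second interleaving loop with two position counters are eliminated: one fused pass scans each run of X in place (inner index scan) and immediately emits the run and the matching block of X_not_rev.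
import Mathlib
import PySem

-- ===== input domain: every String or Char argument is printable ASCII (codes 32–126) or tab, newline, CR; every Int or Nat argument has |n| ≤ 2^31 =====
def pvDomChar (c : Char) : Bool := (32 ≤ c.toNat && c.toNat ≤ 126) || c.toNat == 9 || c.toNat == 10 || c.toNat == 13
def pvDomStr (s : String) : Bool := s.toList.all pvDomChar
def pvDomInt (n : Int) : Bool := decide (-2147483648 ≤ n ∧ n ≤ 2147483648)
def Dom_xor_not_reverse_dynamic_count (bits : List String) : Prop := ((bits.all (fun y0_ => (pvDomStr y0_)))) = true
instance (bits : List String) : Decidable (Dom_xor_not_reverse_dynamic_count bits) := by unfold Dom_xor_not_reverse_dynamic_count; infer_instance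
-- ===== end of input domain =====

-- B fuses A's run-length-encoding pass and its interleaving pass (with its counts list
-- and two position counters) into one in-place scan over runs; alternative decomposition, same cost.


-- ===== PORT A =====
-- shared by both ports (both Pythons compute X and X_not_rev with the same two comprehensions):
-- mid = N//2 on the nonnegative length is Nat division (PySem.Int.floordiv_natCast);
-- bits[:mid]/bits[mid:] are take/drop (PySem.List.slice_to_natCast / slice_from_natCast);
-- A[i]/B[i] for i in range(xor_len) is getD (PySem.List.pyGetD_natCast, i always in range);
-- int(·) is PySem.Int.ofStr? — its none = ValueError is excluded by Pre_, so .getD 0 is never taken;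
-- [::-1] is reverse (PySem.List.slice?_none_none_neg_one).
def pvXList (bits : List String) : List String :=
  let mid : Nat := bits.length / 2
  let A := bits.take mid
  let B := bits.drop mid
  let xorLen : Nat := min A.length B.length
  (List.range xorLen).map (fun i =>
    PySem.Int.toStr (PySem.Int.bxor ((PySem.Int.ofStr? (A.getD i "")).getD 0)
                                    ((PySem.Int.ofStr? (B.getD i "")).getD 0)))

def pvXNotRev (X : List String) : List String :=
  (X.map (fun ch => if ch == "0" then "1" else "0")).reverse

-- A's two loops: the counts loop (state prev/cnt/counts, X[1:] is the match's rest),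
-- then the interleaving fold over counts (state out/pos_X/pos_rev); the slices
-- X[p:p+c] have nonnegative in-range bounds, so they are drop/take
-- (PySem.List.slice_natCast_add; slice is defined as clamped drop/take)
def xor_not_reverse_dynamic_count (bits : List String) : String :=
  let X := pvXList bits
  let X_not_rev := pvXNotRev X
  let counts : List Nat :=
    match X with
    | [] => []
    | x0 :: rest =>
      let s := rest.foldl (fun (s : String × Nat × List Nat) ch =>
        if ch == s.1 then (s.1, s.2.1 + 1, s.2.2)
        else (ch, 1, s.2.2 ++ [s.2.1])) (x0, 1, [])
      s.2.2 ++ [s.2.1]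
  let r := counts.foldl (fun (st : List String × Nat × Nat) c =>
      (st.1 ++ (X.drop st.2.1).take c ++ (X_not_rev.drop st.2.2).take c,
       st.2.1 + c, st.2.2 + c)) ([], 0, 0)
  PySem.Str.join "" r.1

-- ===== PORT B =====
-- the fused while-loop of Source B: i is the current position, the inner `while` scan finds j
-- (it stops at the list end or the first mismatch, i.e. takeWhile on the remainder),
-- the run X[i]*(j-i) and the block ''.join(X_not_rev[i:j]) are appended, i jumps to j
def pvAltLoop (X Xnr : List String) (i : Nat) : List String :=
  if _h : i < X.length then
    let xi := X.getD i ""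
    let j := i + 1 + ((X.drop (i + 1)).takeWhile (fun y => y == xi)).length
    PySem.Str.join "" (List.replicate (j - i) xi)
      :: PySem.Str.join "" ((Xnr.drop i).take (j - i))
      :: pvAltLoop X Xnr j
  else []
termination_by X.length - i
decreasing_by omega

def xor_not_reverse_dynamic_count_alt (bits : List String) : String :=
  let X := pvXList bits
  let X_not_rev := pvXNotRev X
  PySem.Str.join "" (pvAltLoop X X_not_rev 0)

-- ===== PRECONDITION & SPEC =====
-- Pre_ excludes exactly the inputs on which A raises ValueError: some string among the
-- first 2*(len//2) elements (the only ones int() is applied to) is not an int literal.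
def Pre_xor_not_reverse_dynamic_count (bits : List String) : Prop :=
  ((bits.take (bits.length / 2)).all (fun s => (PySem.Int.ofStr? s).isSome)
    && ((bits.drop (bits.length / 2)).take (bits.length / 2)).all
         (fun s => (PySem.Int.ofStr? s).isSome)) = true
instance (bits : List String) : Decidable (Pre_xor_not_reverse_dynamic_count bits) := by
  unfold Pre_xor_not_reverse_dynamic_count; infer_instance

def pvWitness_xor_not_reverse_dynamic_count : List String := ["0", "1", "1", "0"]

def Spec_xor_not_reverse_dynamic_count (bits : List String) (out : String) : Prop := out = xor_not_reverse_dynamic_count_alt bits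
instance (bits : List String) (out : String) : Decidable (Spec_xor_not_reverse_dynamic_count bits out) := by unfold Spec_xor_not_reverse_dynamic_count; infer_instance

-- ===== CLAIM (what is proved, stated in full; the proofs are below) =====
def Claim_equal_xor_not_reverse_dynamic_count : Prop := ∀ (bits : List String), Dom_xor_not_reverse_dynamic_count bits → Pre_xor_not_reverse_dynamic_count bits → Spec_xor_not_reverse_dynamic_count bits (xor_not_reverse_dynamic_count bits)

-- ===== LEMMAS AND PROOFS =====

-- run lengths of a list (what A's counts loop computes)
def pvRunLens (l : List String) : List Nat :=
  match l with
  | [] => []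
  | x :: rest =>
      (1 + (rest.takeWhile (fun y => y == x)).length)
        :: pvRunLens (rest.dropWhile (fun y => y == x))
termination_by l.length
decreasing_by
  simp only [List.length_cons]
  have := List.length_dropWhile_le (fun y => y == x) rest
  omega

-- what A's interleaving fold produces (proved in pvInterFold_eq)
def pvInterR (cs : List Nat) (X Xnr : List String) (p : Nat) : List String :=
  match cs with
  | [] => []
  | c :: cs' => (X.drop p).take c ++ (Xnr.drop p).take c ++ pvInterR cs' X Xnr (p + c)

theorem pvJoin_empty_toList (l : List String) :
    (PySem.Str.join "" l).toList = (l.map String.toList).flatten := by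
  simp only [pysem, PySem.Str.join, PySem.Chars.join]
  generalize l.map String.toList = ls
  induction ls with
  | nil => rfl
  | cons a t ih =>
    cases t with
    | nil => simp [List.intercalate]
    | cons b t2 => simp_all [List.intercalate, List.intersperse]

theorem pvCountsLoop_eq (rest : List String) (prev : String) (cnt : Nat) (acc : List Nat) :
    ((rest.foldl (fun (s : String × Nat × List Nat) ch =>
        if ch == s.1 then (s.1, s.2.1 + 1, s.2.2)
        else (ch, 1, s.2.2 ++ [s.2.1])) (prev, cnt, acc)).2.2
      ++ [(rest.foldl (fun (s : String × Nat × List Nat) ch =>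
        if ch == s.1 then (s.1, s.2.1 + 1, s.2.2)
        else (ch, 1, s.2.2 ++ [s.2.1])) (prev, cnt, acc)).2.1])
    = acc ++ (cnt + (rest.takeWhile (fun y => y == prev)).length)
        :: pvRunLens (rest.dropWhile (fun y => y == prev)) := by
  induction rest generalizing prev cnt acc with
  | nil => simp [pvRunLens]
  | cons ch tl ih =>
    by_cases h : ch = prev
    · subst h
      simp only [List.foldl_cons, List.takeWhile_cons, List.dropWhile_cons,
        beq_self_eq_true, ite_true]
      rw [ih]
      simp only [List.length_cons]
      congr 2
      omega
    · have hb : (ch == prev) = false := by simp [h]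
      simp only [List.foldl_cons, hb, List.takeWhile_cons, List.dropWhile_cons]
      rw [ih]
      simp [pvRunLens, List.append_assoc]

theorem pvInterFold_eq (cs : List Nat) (X Xnr : List String) (p : Nat) (out : List String) :
    (cs.foldl (fun (st : List String × Nat × Nat) c =>
      (st.1 ++ (X.drop st.2.1).take c ++ (Xnr.drop st.2.2).take c,
       st.2.1 + c, st.2.2 + c)) (out, p, p)).1
    = out ++ pvInterR cs X Xnr p := by
  induction cs generalizing p out with
  | nil => simp [pvInterR]
  | cons c cs' ih =>
    simp only [List.foldl_cons]
    rw [ih]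
    simp [pvInterR, List.append_assoc]

theorem pvDropWhile_eq_drop (p : String → Bool) (l : List String) :
    l.dropWhile p = l.drop (l.takeWhile p).length := by
  have h := List.takeWhile_append_dropWhile (p := p) (l := l)
  calc l.dropWhile p
      = (l.takeWhile p ++ l.dropWhile p).drop (l.takeWhile p).length := (List.drop_left).symm
    _ = l.drop (l.takeWhile p).length := by rw [h]

-- the elements of a run are all equal to its head, so the slice of X is a replicate
theorem pvTake_run (x : String) (rest : List String) :
    rest.take ((rest.takeWhile (fun y => y == x)).length)
      = List.replicate ((rest.takeWhile (fun y => y == x)).length) x := by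
  have hpre : rest.takeWhile (fun y => y == x) <+: rest := List.takeWhile_prefix _
  rw [← List.prefix_iff_eq_take.mp hpre]
  apply List.eq_replicate_of_mem
  intro b hb
  have := List.mem_takeWhile_imp hb
  simpa using this

-- core: A's interleave over the run lengths of the suffix X.drop i, flattened,
-- equals B's fused loop from position i, flattened
theorem pvCore (X Xnr : List String) (i : Nat) :
    ((pvInterR (pvRunLens (X.drop i)) X Xnr i).map String.toList).flatten
      = ((pvAltLoop X Xnr i).map String.toList).flatten := by
  by_cases h : i < X.length
  case neg =>
    rw [pvAltLoop]
    simp only [dif_neg h]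
    rw [List.drop_eq_nil_of_le (by omega)]
    simp [pvRunLens, pvInterR]
  case pos =>
    obtain ⟨x, rest, hd⟩ : ∃ x rest, X.drop i = x :: rest := by
      cases hX : X.drop i with
      | nil => exact absurd (List.drop_eq_nil_iff.mp hX) (by omega)
      | cons a l => exact ⟨a, l, rfl⟩
    have hrest : X.drop (i + 1) = rest := by
      rw [← List.tail_drop, hd]
      rfl
    have hx : X.getD i "" = x := by
      have h0 := List.getElem?_drop (xs := X) (i := i) (j := 0)
      rw [hd] at h0
      rw [List.getD_eq_getElem?_getD]
      simp at h0
      simp [← h0]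
    set L := (rest.takeWhile (fun y => y == x)).length with hL
    have hIH := pvCore X Xnr (i + (1 + L))
    rw [pvAltLoop]
    simp only [dif_pos h, hx, hrest, ← hL]
    rw [hd]
    simp only [pvRunLens, ← hL, pvInterR]
    have hc : i + 1 + L - i = 1 + L := by omega
    have hj : i + 1 + L = i + (1 + L) := by omega
    have htake : (X.drop i).take (1 + L) = List.replicate (1 + L) x := by
      rw [hd, Nat.add_comm 1 L, List.take_succ_cons, List.replicate_succ]
      rw [hL, pvTake_run]
    have hdw : rest.dropWhile (fun y => y == x) = X.drop (i + (1 + L)) := by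
      rw [pvDropWhile_eq_drop, ← hL, ← hrest, List.drop_drop]
      congr 1
    rw [hc, hj, hdw, htake]
    simp only [List.map_append, List.flatten_append, List.map_cons, List.flatten_cons,
      pvJoin_empty_toList, List.append_assoc]
    rw [hIH]
termination_by X.length - i
decreasing_by omega

-- ===== VERDICT (by name: the statement is the Claim_ definition above) =====
theorem xor_not_reverse_dynamic_count_spec : Claim_equal_xor_not_reverse_dynamic_count := by
  intro bits _ _
  unfold Spec_xor_not_reverse_dynamic_count
  unfold xor_not_reverse_dynamic_count xor_not_reverse_dynamic_count_alt
  apply String.toList_inj.mp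
  rw [pvJoin_empty_toList, pvJoin_empty_toList]
  rw [pvInterFold_eq]
  have hcounts : (match pvXList bits with
    | [] => ([] : List Nat)
    | x0 :: rest =>
      ((rest.foldl (fun (s : String × Nat × List Nat) ch =>
        if ch == s.1 then (s.1, s.2.1 + 1, s.2.2)
        else (ch, 1, s.2.2 ++ [s.2.1])) (x0, 1, [])).2.2
        ++ [(rest.foldl (fun (s : String × Nat × List Nat) ch =>
        if ch == s.1 then (s.1, s.2.1 + 1, s.2.2)
        else (ch, 1, s.2.2 ++ [s.2.1])) (x0, 1, [])).2.1]))
    = pvRunLens (pvXList bits) := by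
    cases hX : pvXList bits with
    | nil => simp [pvRunLens]
    | cons x0 rest =>
      show ((rest.foldl _ (x0, 1, [])).2.2 ++ [(rest.foldl _ (x0, 1, [])).2.1]) = _
      rw [pvCountsLoop_eq]
      simp [pvRunLens]
  rw [hcounts]
  have := pvCore (pvXList bits) (pvXNotRev (pvXList bits)) 0
  simpa using this
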